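-- pv_equiv track=rewrite | github.com/vcodestudio/VIGA | tools/sam3d/bridge.py | _match_object_name
-- ===== SOURCE A (Python) =====
-- from typing import Dict, List, Optional
--
-- def _match_object_name(prompt: str, object_names: List[str]) -> Optional[str]:
--     prompt_lower = prompt.strip().lower().replace(" ", "_").replace("-", "_")
--     if not prompt_lower:
--         return object_names[0] if object_names else None
--     for name in object_names:
--         if name.lower() == prompt_lower:
--             return name
--     for name in object_names:
--         if prompt_lower in name.lower():
--             return name
--     for name in object_names:
--         if name.lower() in prompt_lower:
--             return name
--     if len(object_names) == 1:
--         return object_names[0]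
--     return None
-- ===== SOURCE B (Python) =====
-- def _match_object_name(prompt, object_names):
--     prompt_lower = prompt.strip().lower().replace(" ", "_").replace("-", "_")
--     if not prompt_lower:
--         return object_names[0] if object_names else None
--     # single pass: rank each name (0 exact, 1 prompt-in-name, 2 name-in-prompt),
--     # keep the first name achieving the smallest rank
--     best, best_name = 3, None
--     for name in object_names:
--         nl = name.lower()
--         if nl == prompt_lower:
--             r = 0
--         elif prompt_lower in nl:
--             r = 1
--         elif nl in prompt_lower:
--             r = 2
--         else:
--             r = 3
--         if r < best:
--             best, best_name = r, name
--             if best == 0: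
--                 break
--     if best < 3:
--         return best_name
--     return object_names[0] if len(object_names) == 1 else None
-- ===== Notes on version B (the rewrite author's own statement) =====
-- stated objective: alternative
-- what changed: A's three sequential scans of object_names (exact match, prompt-in-name, name-in-prompt) are replaced by one pass that ranks each name 0/1/2/3 and keeps the first name with the smallest rank (breaking early on an exact match), with the same empty-prompt and single-object fallbacks.
import Mathlib
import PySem

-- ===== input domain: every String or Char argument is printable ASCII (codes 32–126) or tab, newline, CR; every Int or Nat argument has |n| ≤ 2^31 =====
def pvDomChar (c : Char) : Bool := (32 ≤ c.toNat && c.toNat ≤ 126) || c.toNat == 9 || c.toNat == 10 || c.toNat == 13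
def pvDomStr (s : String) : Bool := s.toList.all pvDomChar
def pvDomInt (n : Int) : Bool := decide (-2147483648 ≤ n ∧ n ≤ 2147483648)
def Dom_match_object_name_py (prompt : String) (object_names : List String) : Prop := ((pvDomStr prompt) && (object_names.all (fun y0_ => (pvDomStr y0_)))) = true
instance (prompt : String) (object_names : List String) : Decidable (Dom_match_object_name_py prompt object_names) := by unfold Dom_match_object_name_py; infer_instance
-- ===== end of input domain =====

-- B replaces A's three sequential scans by a single pass that tracks the best
-- (smallest) match rank and the first name achieving it (objective: alternative).

-- ===== PORT A =====
def match_object_name_py (prompt : String) (object_names : List String) : Option String :=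
  let prompt_lower := PySem.Str.replace (PySem.Str.replace (PySem.Str.lower (PySem.Str.strip prompt)) " " "_") "-" "_"
  if prompt_lower = "" then
    match object_names with
    | [] => none
    | n :: _ => some n
  else
    match object_names.find? (fun name => PySem.Str.lower name == prompt_lower) with
    | some name => some name
    | none =>
      match object_names.find? (fun name => PySem.Str.isIn prompt_lower (PySem.Str.lower name)) with
      | some name => some name
      | none =>
        match object_names.find? (fun name => PySem.Str.isIn (PySem.Str.lower name) prompt_lower) with
        | some name => some name
        | none => if object_names.length = 1 then object_names.head? else none

-- ===== PORT B =====
def pvRank (pl : String) (name : String) : Nat :=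
  if PySem.Str.lower name == pl then 0
  else if PySem.Str.isIn pl (PySem.Str.lower name) then 1
  else if PySem.Str.isIn (PySem.Str.lower name) pl then 2
  else 3

-- the single pass of Source B, with its early break once rank 0 is reached
def pvLoop (pl : String) : List String → Nat → Option String → Nat × Option String
  | [], b, bn => (b, bn)
  | name :: t, b, bn =>
    let r := pvRank pl name
    if r < b then
      if r = 0 then (r, some name) else pvLoop pl t r (some name)
    else pvLoop pl t b bn

def match_object_name_py_alt (prompt : String) (object_names : List String) : Option String :=
  let pl := PySem.Str.replace (PySem.Str.replace (PySem.Str.lower (PySem.Str.strip prompt)) " " "_") "-" "_"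
  if pl = "" then object_names.head?
  else
    let best := pvLoop pl object_names 3 none
    if best.1 < 3 then best.2
    else if object_names.length = 1 then object_names.head? else none

-- ===== PRECONDITION & SPEC =====
def Spec_match_object_name_py (prompt : String) (object_names : List String) (out : Option String) : Prop := out = match_object_name_py_alt prompt object_names
instance (prompt : String) (object_names : List String) (out : Option String) : Decidable (Spec_match_object_name_py prompt object_names out) := by unfold Spec_match_object_name_py; infer_instance

-- ===== CLAIM (what is proved, stated in full; the proofs are below) =====
def Claim_equal_match_object_name_py : Prop := ∀ (prompt : String) (object_names : List String), Dom_match_object_name_py prompt object_names → Spec_match_object_name_py prompt object_names (match_object_name_py prompt object_names)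

-- ===== LEMMAS AND PROOFS =====

theorem pv_rank_zero (pl x : String) :
    (PySem.Str.lower x == pl) = (pvRank pl x == 0) := by
  unfold pvRank
  split_ifs with h1 h2 h3 <;> simp_all

theorem pv_rank_one (pl x : String) (h : pvRank pl x ≠ 0) :
    (PySem.Str.isIn pl (PySem.Str.lower x)) = (pvRank pl x == 1) := by
  unfold pvRank at *
  split_ifs at * with h1 h2 h3 <;> simp_all

theorem pv_rank_two (pl x : String) (h : 2 ≤ pvRank pl x) :
    (PySem.Str.isIn (PySem.Str.lower x) pl) = (pvRank pl x == 2) := by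
  unfold pvRank at *
  split_ifs at * with h1 h2 h3 <;> simp_all

theorem pv_rank_le_three (pl x : String) : pvRank pl x ≤ 3 := by
  unfold pvRank; split_ifs <;> omega

theorem pv_find?_congr {α : Type} (l : List α) (p q : α → Bool)
    (h : ∀ x ∈ l, p x = q x) : l.find? p = l.find? q := by
  induction l with
  | nil => rfl
  | cons x t ih =>
    simp only [List.find?_cons, h x (by simp)]
    cases hq : q x <;> simp [ih (fun y hy => h y (by simp [hy]))]

-- the running minimum of pvRank over l, starting from b
def pvMin (pl : String) (l : List String) (b : Nat) : Nat :=
  l.foldl (fun a x => min a (pvRank pl x)) b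

theorem pvMin_le (pl : String) (l : List String) (b : Nat) : pvMin pl l b ≤ b := by
  induction l generalizing b with
  | nil => simp [pvMin]
  | cons x t ih =>
    calc pvMin pl (x :: t) b = pvMin pl t (min b (pvRank pl x)) := rfl
      _ ≤ min b (pvRank pl x) := ih _
      _ ≤ b := by omega

theorem pvMin_le_mem (pl : String) (l : List String) (b : Nat) :
    ∀ y ∈ l, pvMin pl l b ≤ pvRank pl y := by
  induction l generalizing b with
  | nil => simp
  | cons x t ih =>
    intro y hy
    rcases List.mem_cons.mp hy with rfl | hy
    · calc pvMin pl (y :: t) b = pvMin pl t (min b (pvRank pl y)) := rfl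
        _ ≤ min b (pvRank pl y) := pvMin_le _ _ _
        _ ≤ pvRank pl y := by omega
    · exact ih _ y hy

theorem pvMin_attained (pl : String) (l : List String) (b : Nat) :
    pvMin pl l b = b ∨ ∃ y ∈ l, pvRank pl y = pvMin pl l b := by
  induction l generalizing b with
  | nil => left; rfl
  | cons x t ih =>
    have hx : pvMin pl (x :: t) b = pvMin pl t (min b (pvRank pl x)) := rfl
    rcases ih (min b (pvRank pl x)) with h | ⟨y, hy, hr⟩
    · by_cases hc : pvRank pl x < b
      · right; exact ⟨x, by simp, by rw [hx, h]; omega⟩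
      · left; rw [hx, h]; omega
    · right; exact ⟨y, by simp [hy], by rw [hx, ← hr]⟩

-- characterization of B's single-pass fold
theorem pv_fold_spec (pl : String) (l : List String) :
    ∀ (b : Nat) (bn : Option String),
    l.foldl (fun acc name =>
        let r := pvRank pl name
        if r < acc.1 then (r, some name) else acc) (b, bn)
    = (pvMin pl l b,
       if pvMin pl l b < b then l.find? (fun x => pvRank pl x == pvMin pl l b) else bn) := by
  induction l with
  | nil => intro b bn; simp [pvMin]
  | cons x t ih =>
    intro b bn
    have hM : pvMin pl (x :: t) b = pvMin pl t (min b (pvRank pl x)) := rfl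
    simp only [List.foldl_cons]
    by_cases hc : pvRank pl x < b
    · have hm : min b (pvRank pl x) = pvRank pl x := by omega
      rw [if_pos hc, ih (pvRank pl x) (some x), hM, hm]
      have hle : pvMin pl t (pvRank pl x) ≤ pvRank pl x := pvMin_le _ _ _
      by_cases h2 : pvMin pl t (pvRank pl x) < pvRank pl x
      · rw [if_pos h2, if_pos (by omega), List.find?_cons,
          show ((pvRank pl x == pvMin pl t (pvRank pl x)) = false) by simp; omega]
      · have he : pvMin pl t (pvRank pl x) = pvRank pl x := by omega
        rw [if_neg h2, if_pos (by omega), List.find?_cons,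
          show ((pvRank pl x == pvMin pl t (pvRank pl x)) = true) by simp [he]]
    · have hm : min b (pvRank pl x) = b := by omega
      rw [if_neg hc, ih b bn, hM, hm]
      by_cases h2 : pvMin pl t b < b
      · rw [if_pos h2, if_pos h2, List.find?_cons,
          show ((pvRank pl x == pvMin pl t b) = false) by simp; omega]
      · rw [if_neg h2, if_neg h2]

theorem pvLoop_eq_foldl (pl : String) (l : List String) :
    ∀ (b : Nat) (bn : Option String),
    pvLoop pl l b bn
    = l.foldl (fun acc name =>
        let r := pvRank pl name
        if r < acc.1 then (r, some name) else acc) (b, bn) := by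
  induction l with
  | nil => intro b bn; rfl
  | cons x t ih =>
    intro b bn
    simp only [pvLoop, List.foldl_cons]
    by_cases hc : pvRank pl x < b
    · rw [if_pos hc, if_pos hc]
      by_cases h0 : pvRank pl x = 0
      · rw [if_pos h0, pv_fold_spec]
        have := pvMin_le pl t (pvRank pl x)
        have hm0 : pvMin pl t (pvRank pl x) = 0 := by omega
        rw [hm0, h0]
        simp
      · rw [if_neg h0, ih]
    · rw [if_neg hc, if_neg hc, ih]

-- ===== VERDICT (by name: the statement is the Claim_ definition above) =====
theorem match_object_name_py_spec : Claim_equal_match_object_name_py := by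
  intro prompt object_names _
  unfold Spec_match_object_name_py match_object_name_py match_object_name_py_alt
  set pl := PySem.Str.replace (PySem.Str.replace (PySem.Str.lower (PySem.Str.strip prompt)) " " "_") "-" "_" with hpl
  by_cases hempty : pl = ""
  · simp only [if_pos hempty]
    cases object_names <;> rfl
  · simp only [if_neg hempty]
    rw [pvLoop_eq_foldl, pv_fold_spec pl object_names 3 none]
    set M := pvMin pl object_names 3 with hM
    have hle3 : M ≤ 3 := pvMin_le _ _ _
    have hmem := pvMin_le_mem pl object_names 3
    have hc0 : object_names.find? (fun name => PySem.Str.lower name == pl)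
        = object_names.find? (fun x => pvRank pl x == 0) :=
      pv_find?_congr _ _ _ (fun x _ => pv_rank_zero pl x)
    interval_cases M
    · -- M = 0
      rcases pvMin_attained pl object_names 3 with h | ⟨y, hy, hr⟩
      · omega
      rw [← hM] at hr
      have : (object_names.find? (fun x => pvRank pl x == 0)).isSome := by
        rw [List.find?_isSome]; exact ⟨y, hy, by simp [hr]⟩
      obtain ⟨n, hn⟩ := Option.isSome_iff_exists.mp this
      rw [hc0, hn]; simp
    · -- M = 1
      have hno0 : ∀ x ∈ object_names, pvRank pl x ≠ 0 := by
        intro x hx; have := hmem x hx; omega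
      have h0 : object_names.find? (fun x => pvRank pl x == 0) = none := by
        rw [List.find?_eq_none]; intro x hx; simp [hno0 x hx]
      have hc1 : object_names.find? (fun name => PySem.Str.isIn pl (PySem.Str.lower name))
          = object_names.find? (fun x => pvRank pl x == 1) :=
        pv_find?_congr _ _ _ (fun x hx => pv_rank_one pl x (hno0 x hx))
      rcases pvMin_attained pl object_names 3 with h | ⟨y, hy, hr⟩
      · omega
      rw [← hM] at hr
      have : (object_names.find? (fun x => pvRank pl x == 1)).isSome := by
        rw [List.find?_isSome]; exact ⟨y, hy, by simp [hr]⟩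
      obtain ⟨n, hn⟩ := Option.isSome_iff_exists.mp this
      rw [hc0, h0, hc1, hn]; simp
    · -- M = 2
      have hge2 : ∀ x ∈ object_names, 2 ≤ pvRank pl x := by
        intro x hx; have := hmem x hx; omega
      have h0 : object_names.find? (fun x => pvRank pl x == 0) = none := by
        rw [List.find?_eq_none]; intro x hx; have := hge2 x hx; simp; omega
      have h1 : object_names.find? (fun name => PySem.Str.isIn pl (PySem.Str.lower name)) = none := by
        rw [pv_find?_congr _ _ (fun x => pvRank pl x == 1)
          (fun x hx => pv_rank_one pl x (by have := hge2 x hx; omega))]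
        rw [List.find?_eq_none]; intro x hx; have := hge2 x hx; simp; omega
      have hc2 : object_names.find? (fun name => PySem.Str.isIn (PySem.Str.lower name) pl)
          = object_names.find? (fun x => pvRank pl x == 2) :=
        pv_find?_congr _ _ _ (fun x hx => pv_rank_two pl x (hge2 x hx))
      rcases pvMin_attained pl object_names 3 with h | ⟨y, hy, hr⟩
      · omega
      rw [← hM] at hr
      have : (object_names.find? (fun x => pvRank pl x == 2)).isSome := by
        rw [List.find?_isSome]; exact ⟨y, hy, by simp [hr]⟩
      obtain ⟨n, hn⟩ := Option.isSome_iff_exists.mp this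
      rw [hc0, h0, h1, hc2, hn]; simp
    · -- M = 3: no match at all
      have hall : ∀ x ∈ object_names, pvRank pl x = 3 := by
        intro x hx; have h1 := hmem x hx; have h2 := pv_rank_le_three pl x; omega
      have h0 : object_names.find? (fun name => PySem.Str.lower name == pl) = none := by
        rw [hc0, List.find?_eq_none]; intro x hx; simp [hall x hx]
      have h1 : object_names.find? (fun name => PySem.Str.isIn pl (PySem.Str.lower name)) = none := by
        rw [pv_find?_congr _ _ (fun x => pvRank pl x == 1)
          (fun x hx => pv_rank_one pl x (by rw [hall x hx]; omega))]
        rw [List.find?_eq_none]; intro x hx; simp [hall x hx]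
      have h2 : object_names.find? (fun name => PySem.Str.isIn (PySem.Str.lower name) pl) = none := by
        rw [pv_find?_congr _ _ (fun x => pvRank pl x == 2)
          (fun x hx => pv_rank_two pl x (by rw [hall x hx]; omega))]
        rw [List.find?_eq_none]; intro x hx; simp [hall x hx]
      rw [h0, h1, h2]
      simp
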